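-- pv_equiv track=rewrite | github.com/pypi-data/pypi-mirror-404 | packages/clanker/clanker-1.0.0.tar.gz/clanker-1.0.0/src/clanker/cli.py | _extract_global_flags
-- ===== SOURCE A (Python) =====
-- def _extract_global_flags(argv: list[str]) -> tuple[list[str], bool]:
--     verbose = False
--     remaining: list[str] = []
--     stop = False
--     for arg in argv:
--         if arg == "--":
--             stop = True
--             remaining.append(arg)
--             continue
--         if not stop and arg in {"-v", "--verbose"}:
--             verbose = True
--             continue
--         remaining.append(arg)
--     return remaining, verbose
-- ===== SOURCE B (Python) =====
-- _FLAGS = {"-v", "--verbose"}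
--
-- def _extract_global_flags(argv: list[str]) -> tuple[list[str], bool]:
--     idx = argv.index("--") if "--" in argv else len(argv)
--     head, tail = argv[:idx], argv[idx:]
--     remaining = [a for a in head if a not in _FLAGS] + tail
--     verbose = any(a in _FLAGS for a in head)
--     return remaining, verbose
-- ===== Notes on version B (the rewrite author's own statement) =====
-- stated objective: simpler
-- what changed: Replaces the per-element stop state machine with a precomputed split at the first '--' (index + two slices), then a filter on the head segment and an any() for verbose.
import Mathlib
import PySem

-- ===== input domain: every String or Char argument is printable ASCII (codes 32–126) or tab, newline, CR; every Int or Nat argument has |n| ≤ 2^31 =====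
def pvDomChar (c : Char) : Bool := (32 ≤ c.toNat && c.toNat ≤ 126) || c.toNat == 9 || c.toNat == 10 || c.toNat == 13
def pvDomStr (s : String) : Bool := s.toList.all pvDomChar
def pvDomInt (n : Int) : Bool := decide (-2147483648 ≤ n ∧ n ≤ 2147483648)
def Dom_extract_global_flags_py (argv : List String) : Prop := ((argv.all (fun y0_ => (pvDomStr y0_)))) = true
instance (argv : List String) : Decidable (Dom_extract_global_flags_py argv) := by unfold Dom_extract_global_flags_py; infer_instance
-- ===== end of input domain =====

-- B replaces A's per-element stop state machine with a split at the first "--" (index + two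
-- slices), a filter on the head and an any for verbose; objective: simpler decomposition.


-- ===== PORT A =====
-- A's loop, step for step: state (verbose, remaining, stop), branches in source order.
def extract_global_flags_py (argv : List String) : List String × Bool :=
  let st := argv.foldl (fun (st : Bool × List String × Bool) arg =>
      let (verbose, remaining, stop) := st
      if arg == "--" then (verbose, remaining ++ [arg], true)
      else if !stop && (arg == "-v" || arg == "--verbose") then (true, remaining, stop)
      else (verbose, remaining ++ [arg], stop))
    (false, [], false)
  (st.2.1, st.1)

-- ===== PORT B =====
def pvIsFlag (a : String) : Bool := a == "-v" || a == "--verbose"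

def extract_global_flags_py_alt (argv : List String) : List String × Bool :=
  let idx := (PySem.List.index? argv "--").getD argv.length
  let head := PySem.List.slice argv none (some (idx : Int))
  let tail := PySem.List.slice argv (some (idx : Int)) none
  (head.filter (fun a => !pvIsFlag a) ++ tail, head.any pvIsFlag)

-- ===== PRECONDITION & SPEC =====
def Spec_extract_global_flags_py (argv : List String) (out : List String × Bool) : Prop := out = extract_global_flags_py_alt argv
instance (argv : List String) (out : List String × Bool) : Decidable (Spec_extract_global_flags_py argv out) := by unfold Spec_extract_global_flags_py; infer_instance

-- ===== CLAIM (what is proved, stated in full; the proofs are below) =====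
def Claim_equal_extract_global_flags_py : Prop := ∀ (argv : List String), Dom_extract_global_flags_py argv → Spec_extract_global_flags_py argv (extract_global_flags_py argv)

-- ===== LEMMAS AND PROOFS =====

-- One step of A's fold, named for the induction.
def pvStepA (st : Bool × List String × Bool) (arg : String) : Bool × List String × Bool :=
  if arg == "--" then (st.1, st.2.1 ++ [arg], true)
  else if !st.2.2 && (arg == "-v" || arg == "--verbose") then (true, st.2.1, st.2.2)
  else (st.1, st.2.1 ++ [arg], st.2.2)

lemma pvStepA_eq (st : Bool × List String × Bool) (arg : String) :
    (fun (st : Bool × List String × Bool) arg =>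
      let (verbose, remaining, stop) := st
      if arg == "--" then (verbose, remaining ++ [arg], true)
      else if !stop && (arg == "-v" || arg == "--verbose") then (true, remaining, stop)
      else (verbose, remaining ++ [arg], stop)) st arg = pvStepA st arg := by
  rcases st with ⟨v, r, s⟩; rfl

-- once stop is set, A just copies the rest of the list
lemma foldl_stepA_stopped (l : List String) (v : Bool) (r : List String) :
    l.foldl pvStepA (v, r, true) = (v, r ++ l, true) := by
  induction l generalizing r with
  | nil => simp
  | cons a t ih =>
    by_cases h : a = "--" <;>
      simp [pvStepA, h, ih, List.append_assoc]

-- B on a cons, unfolded to a recursive shape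
lemma alt_nil : extract_global_flags_py_alt [] = ([], false) := by decide

lemma alt_cons_sep (rest : List String) :
    extract_global_flags_py_alt ("--" :: rest) = ("--" :: rest, false) := by
  simp [extract_global_flags_py_alt, PySem.List.slice_to,
    PySem.List.slice_from]

lemma alt_cons_ne (a : String) (rest : List String) (h : a ≠ "--") :
    extract_global_flags_py_alt (a :: rest) =
      (let (r, v) := extract_global_flags_py_alt rest
       (if pvIsFlag a then r else a :: r, pvIsFlag a || v)) := by
  simp only [extract_global_flags_py_alt]
  rw [PySem.List.index?_cons_of_ne rest h]
  cases hidx : PySem.List.index? rest "--" with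
  | none =>
      simp only [Option.map_none, Option.getD_none, List.length_cons]
      rw [show ((rest.length + 1 : Nat) : Int) = ((rest.length + 1 : Nat) : Int) from rfl]
      rw [PySem.List.slice_to_natCast, PySem.List.slice_from_natCast]
      rw [show ((rest.length : Nat) : Int) = ((rest.length : Nat) : Int) from rfl]
      rw [PySem.List.slice_to_natCast, PySem.List.slice_from_natCast]
      simp [List.take_of_length_le, List.drop_of_length_le]
      by_cases hf : pvIsFlag a <;> simp [hf]
  | some k =>
      simp only [Option.map_some, Option.getD_some]
      rw [show (((k + 1 : Nat)) : Int) = ((k + 1 : Nat) : Int) from rfl]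
      rw [PySem.List.slice_to_natCast, PySem.List.slice_from_natCast]
      rw [show ((k : Nat) : Int) = ((k : Nat) : Int) from rfl]
      rw [PySem.List.slice_to_natCast, PySem.List.slice_from_natCast]
      simp only [List.take_succ_cons, List.drop_succ_cons]
      by_cases hf : pvIsFlag a <;> simp [hf]

-- main invariant: A's fold from an unstopped state computes B's result with accumulators
lemma foldl_stepA_eq_alt (l : List String) (v : Bool) (r : List String) :
    l.foldl pvStepA (v, r, false) =
      ((v || (extract_global_flags_py_alt l).2,
        r ++ (extract_global_flags_py_alt l).1,
        (PySem.List.index? l "--").isSome)) := by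
  induction l generalizing v r with
  | nil => simp [alt_nil, PySem.List.index?]
  | cons a t ih =>
    by_cases h : a = "--"
    · subst h
      simp only [alt_cons_sep, PySem.List.index?_cons_self]
      simp [pvStepA, foldl_stepA_stopped, List.append_assoc]
    · rw [PySem.List.index?_cons_of_ne t h]
      rw [alt_cons_ne a t h]
      by_cases hf : pvIsFlag a
      · have hne : ¬(a == "--") = true := by simpa using h
        have hthis : (!false && (a == "-v" || a == "--verbose")) = true := by
          simpa [pvIsFlag] using hf
        simp only [List.foldl_cons, pvStepA, hne, Bool.false_eq_true, if_false, hthis, if_pos]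
        rw [ih true r]
        cases hx : extract_global_flags_py_alt t with
        | mk r' v' => simp [hf, Option.isSome_map]
      · have hne : ¬(a == "--") = true := by simpa using h
        have hf' : (!false && (a == "-v" || a == "--verbose")) = false := by
          simpa [pvIsFlag] using hf
        simp only [List.foldl_cons, pvStepA, hne, if_false, hf', Bool.false_eq_true]
        rw [ih v (r ++ [a])]
        cases hx : extract_global_flags_py_alt t with
        | mk r' v' => simp [hf, Option.isSome_map, List.append_assoc]

-- ===== VERDICT (by name: the statement is the Claim_ definition above) =====
theorem extract_global_flags_py_spec : Claim_equal_extract_global_flags_py := by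
  intro argv _
  unfold Spec_extract_global_flags_py extract_global_flags_py
  simp only [funext fun st => funext fun arg => pvStepA_eq st arg]
  rw [foldl_stepA_eq_alt argv false []]
  simp
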